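-- pv_equiv track=rewrite | github.com/ModSquad2020/SD_Matt | m1A_test/TestingNNN/NNNSlicer.py | threeRegions
-- ===== SOURCE A (Python) =====
-- alignedRegions = {  'AA-acceptor1': (0,9),
-- 					'AA-acceptor2': (139,147),
-- 					'D-arm': (9,27),
-- 					'Anticodon loop1': (27,39),
-- 					'Intron': (39,99),
-- 					'Anticodon loop2': (99,105),
-- 					'Variable loop': (105,122),
-- 					'T-arm': (122,139)
--
-- 				}
--
-- def threeRegions(primarySequence, na1, na2, na3):
-- 	''''''
-- 	part1=na1
-- 	a1= alignedRegions[part1][0]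
-- 	a2= alignedRegions[part1][1]
--
-- 	part2=na2
-- 	b1= alignedRegions[part2][0]
-- 	b2= alignedRegions[part2][1]
--
-- 	part3=na3
-- 	c1= alignedRegions[part3][0]
-- 	c2= alignedRegions[part3][1]
--
-- 	newSequence = ""
-- 	for n, letter in enumerate(primarySequence):
-- 		if letter.isalpha():
-- 			if n in range(a1,a2) or n in range(b1,b2) or n in range(c1,c2):
-- 				newSequence += letter
-- 			else:
-- 				newSequence += "N"
-- 		else:
-- 			newSequence += "-"
-- 	return newSequence
-- ===== SOURCE B (Python) =====
-- alignedRegions = {  'AA-acceptor1': (0,9),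
--                     'AA-acceptor2': (139,147),
--                     'D-arm': (9,27),
--                     'Anticodon loop1': (27,39),
--                     'Intron': (39,99),
--                     'Anticodon loop2': (99,105),
--                     'Variable loop': (105,122),
--                     'T-arm': (122,139)
--                 }
--
-- def threeRegions(primarySequence, na1, na2, na3):
--     # Phase 1: mask everything ('N' for letters, '-' for non-letters).
--     result = ['N' if ch.isalpha() else '-' for ch in primarySequence]
--     # Phase 2: walk the three regions directly and restore the letters there.
--     L = len(primarySequence)
--     for name in (na1, na2, na3):
--         lo, hi = alignedRegions[name]
--         for n in range(lo, min(hi, L)):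
--             if primarySequence[n].isalpha():
--                 result[n] = primarySequence[n]
--     return ''.join(result)
-- ===== Notes on version B (the rewrite author's own statement) =====
-- stated objective: alternative
-- what changed: Instead of testing every position for membership in three ranges during one building pass, B first builds a fully masked base in one pass and then iterates only over the three (clipped) regions, overwriting with the original letters.
import Mathlib
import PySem

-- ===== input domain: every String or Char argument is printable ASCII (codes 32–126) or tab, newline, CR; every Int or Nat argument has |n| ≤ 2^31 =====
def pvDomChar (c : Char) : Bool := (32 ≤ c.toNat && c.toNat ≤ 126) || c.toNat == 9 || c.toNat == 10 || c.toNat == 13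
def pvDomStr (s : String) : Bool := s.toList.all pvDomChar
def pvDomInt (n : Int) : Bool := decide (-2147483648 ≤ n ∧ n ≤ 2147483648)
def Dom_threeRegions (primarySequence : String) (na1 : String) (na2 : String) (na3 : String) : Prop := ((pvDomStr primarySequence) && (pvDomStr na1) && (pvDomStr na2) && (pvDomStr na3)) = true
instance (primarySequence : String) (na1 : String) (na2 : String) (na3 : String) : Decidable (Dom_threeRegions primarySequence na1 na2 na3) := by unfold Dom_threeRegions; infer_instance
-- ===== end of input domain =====

-- B builds a fully masked base list in one pass, then overwrites only the three (length-clipped)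
-- regions with the original letters, instead of testing each position for range membership.


-- ===== PORT A =====
def alignedRegions : PySem.Dict String (Int × Int) :=
  PySem.Dict.ofList [("AA-acceptor1", (0, 9)), ("AA-acceptor2", (139, 147)),
    ("D-arm", (9, 27)), ("Anticodon loop1", (27, 39)), ("Intron", (39, 99)),
    ("Anticodon loop2", (99, 105)), ("Variable loop", (105, 122)), ("T-arm", (122, 139))]

-- literal port of A; the KeyError on a missing key is excluded by Pre_ (getD's default is never used there)
def threeRegions (primarySequence : String) (na1 : String) (na2 : String) (na3 : String) : String :=
  let p1 := (alignedRegions.get? na1).getD (0, 0)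
  let a1 := p1.1
  let a2 := p1.2
  let p2 := (alignedRegions.get? na2).getD (0, 0)
  let b1 := p2.1
  let b2 := p2.2
  let p3 := (alignedRegions.get? na3).getD (0, 0)
  let c1 := p3.1
  let c2 := p3.2
  let newSequence : List Char :=
    (PySem.List.enumerate primarySequence.toList 0).foldl (fun acc nl =>
      if PySem.Chars.isalpha nl.2 then
        if nl.1 ∈ PySem.List.pyRange a1 a2 1 ∨ nl.1 ∈ PySem.List.pyRange b1 b2 1 ∨
            nl.1 ∈ PySem.List.pyRange c1 c2 1 then
          acc ++ [nl.2]
        else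
          acc ++ ['N']
      else
        acc ++ ['-']) []
  String.mk newSequence

-- ===== PORT B =====
-- the inner 'for n in range(lo, min(hi, L)): if s[n].isalpha(): result[n] = s[n]' loop of Source B
def patchRegion (ps : List Char) (lo hi : Int) (res : List Char) : List Char :=
  (PySem.List.pyRange lo (min hi (ps.length : Int)) 1).foldl (fun r n =>
    if PySem.Chars.isalpha (PySem.List.pyGetD ps n ' ') then
      r.set n.toNat (PySem.List.pyGetD ps n ' ')
    else r) res

def threeRegions_alt (primarySequence : String) (na1 : String) (na2 : String) (na3 : String) : String :=
  let base := primarySequence.toList.map (fun ch => if PySem.Chars.isalpha ch then 'N' else '-')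
  let res := [na1, na2, na3].foldl (fun r name =>
    let p := (alignedRegions.get? name).getD (0, 0)
    patchRegion primarySequence.toList p.1 p.2 r) base
  String.mk res

-- ===== PRECONDITION & SPEC =====
-- Pre_ excludes exactly the inputs where Python A raises KeyError: a region name missing from alignedRegions.
def Pre_threeRegions (primarySequence : String) (na1 : String) (na2 : String) (na3 : String) : Prop :=
  (alignedRegions.contains na1 && alignedRegions.contains na2 && alignedRegions.contains na3) = true
instance (primarySequence : String) (na1 : String) (na2 : String) (na3 : String) : Decidable (Pre_threeRegions primarySequence na1 na2 na3) := by unfold Pre_threeRegions; infer_instance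

def pvWitness_threeRegions : String × String × String × String := ("ACgu-.TT", "AA-acceptor1", "D-arm", "T-arm")

def Spec_threeRegions (primarySequence : String) (na1 : String) (na2 : String) (na3 : String) (out : String) : Prop := out = threeRegions_alt primarySequence na1 na2 na3
instance (primarySequence : String) (na1 : String) (na2 : String) (na3 : String) (out : String) : Decidable (Spec_threeRegions primarySequence na1 na2 na3 out) := by unfold Spec_threeRegions; infer_instance

-- ===== CLAIM (what is proved, stated in full; the proofs are below) =====
def Claim_equal_threeRegions : Prop := ∀ (primarySequence : String) (na1 : String) (na2 : String) (na3 : String), Dom_threeRegions primarySequence na1 na2 na3 → Pre_threeRegions primarySequence na1 na2 na3 → Spec_threeRegions primarySequence na1 na2 na3 (threeRegions primarySequence na1 na2 na3)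

-- ===== LEMMAS AND PROOFS =====

-- every region pair looked up (or the getD default) has a non-negative lower bound
lemma region_lo_nonneg (na : String) : 0 ≤ ((alignedRegions.get? na).getD (0, 0)).1 := by
  cases h : alignedRegions.get? na with
  | none => simp
  | some p =>
      have hmem := PySem.Dict.mem_items_of_get?_eq_some alignedRegions h
      simp only [alignedRegions, PySem.Dict.ofList] at hmem
      fin_cases hmem <;> simp

-- one patch loop keeps the list length
lemma patchRegion_length (ps : List Char) (lo hi : Int) (res : List Char) :
    (patchRegion ps lo hi res).length = res.length := by
  unfold patchRegion
  generalize PySem.List.pyRange lo (min hi (ps.length : Int)) 1 = l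
  induction l generalizing res with
  | nil => rfl
  | cons n l ih =>
      rw [List.foldl_cons, ih]
      split <;> simp

-- pointwise description of one patch loop
lemma patchRegion_getElem? (ps : List Char) (lo m : Int) (hm : m ≤ (ps.length : Int))
    (hlo : 0 ≤ lo) :
    ∀ (res : List Char), res.length = ps.length → ∀ k : Nat,
    ((PySem.List.pyRange lo m 1).foldl (fun r n =>
        if PySem.Chars.isalpha (PySem.List.pyGetD ps n ' ') then
          r.set n.toNat (PySem.List.pyGetD ps n ' ')
        else r) res)[k]? =
    if lo ≤ (k : Int) ∧ (k : Int) < m ∧ PySem.Chars.isalpha (ps.getD k ' ') then ps[k]?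
    else res[k]? := by
  induction hn : (m - lo).toNat generalizing lo with
  | zero =>
      intro res hres k
      rw [PySem.List.pyRange_one_eq_nil (by omega)]
      simp only [List.foldl_nil]
      rw [if_neg (by rintro ⟨h1, h2, -⟩; omega)]
  | succ n ih =>
      intro res hres k
      have hlm : lo < m := by omega
      rw [PySem.List.pyRange_one_cons hlm, List.foldl_cons]
      have hlt : lo.toNat < ps.length := by omega
      have hget : PySem.List.pyGetD ps lo ' ' = ps[lo.toNat] :=
        PySem.List.pyGetD_eq_getElem ps ' ' hlo (by omega)
      have hgetD : ps.getD lo.toNat ' ' = ps[lo.toNat] := by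
        rw [List.getD_eq_getElem?_getD, List.getElem?_eq_getElem hlt]; rfl
      set res' : List Char :=
        (if PySem.Chars.isalpha (PySem.List.pyGetD ps lo ' ') then
          res.set lo.toNat (PySem.List.pyGetD ps lo ' ')
        else res) with hres'
      have hlen' : res'.length = ps.length := by
        rw [hres']; split <;> simp [hres]
      rw [ih (lo + 1) (by omega) (by omega) res' hlen' k]
      by_cases hk : (k : Int) = lo
      · have hkn : k = lo.toNat := by omega
        subst hkn
        rw [if_neg (by rintro ⟨h1, -, -⟩; omega)]
        rw [hres']
        by_cases ha : PySem.Chars.isalpha (PySem.List.pyGetD ps lo ' ')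
        · rw [if_pos ha, List.getElem?_set_self (by omega),
            if_pos ⟨by omega, by omega, by rw [hgetD, ← hget]; exact ha⟩,
            List.getElem?_eq_getElem hlt, hget]
        · rw [if_neg ha, if_neg (by rintro ⟨-, -, hc⟩; rw [hgetD, ← hget] at hc; exact ha hc)]
      · have hkne : lo.toNat ≠ k := by omega
        have hres'k : res'[k]? = res[k]? := by
          rw [hres']; split
          · rw [List.getElem?_set_ne hkne]
          · rfl
        rw [hres'k]
        by_cases h1 : lo + 1 ≤ (k : Int) ∧ (k : Int) < m ∧ PySem.Chars.isalpha (ps.getD k ' ')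
        · rw [if_pos h1, if_pos ⟨by omega, h1.2⟩]
        · rw [if_neg h1, if_neg (by rintro ⟨ha, hb, hc⟩; exact h1 ⟨by omega, hb, hc⟩)]

-- pointwise description of patchRegion itself
lemma patchRegion_getElem (ps : List Char) (lo hi : Int) (hlo : 0 ≤ lo)
    (res : List Char) (hres : res.length = ps.length) (k : Nat) :
    (patchRegion ps lo hi res)[k]? =
    if lo ≤ (k : Int) ∧ (k : Int) < min hi (ps.length : Int) ∧
        PySem.Chars.isalpha (ps.getD k ' ') then ps[k]?
    else res[k]? :=
  patchRegion_getElem? ps lo (min hi (ps.length : Int)) (min_le_right _ _) hlo res hres k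

-- ===== VERDICT (by name: the statement is the Claim_ definition above) =====
theorem threeRegions_spec : Claim_equal_threeRegions := by
  intro ps na1 na2 na3 _ _
  unfold Spec_threeRegions threeRegions threeRegions_alt
  simp only [List.foldl_cons, List.foldl_nil]
  congr 1
  have hbody : (fun (acc : List Char) (nl : Int × Char) =>
      if PySem.Chars.isalpha nl.2 then
        if nl.1 ∈ PySem.List.pyRange ((alignedRegions.get? na1).getD (0, 0)).1 ((alignedRegions.get? na1).getD (0, 0)).2 1 ∨
            nl.1 ∈ PySem.List.pyRange ((alignedRegions.get? na2).getD (0, 0)).1 ((alignedRegions.get? na2).getD (0, 0)).2 1 ∨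
            nl.1 ∈ PySem.List.pyRange ((alignedRegions.get? na3).getD (0, 0)).1 ((alignedRegions.get? na3).getD (0, 0)).2 1 then
          acc ++ [nl.2]
        else acc ++ ['N']
      else acc ++ ['-']) = (fun acc nl => acc ++
        [if PySem.Chars.isalpha nl.2 then
          if nl.1 ∈ PySem.List.pyRange ((alignedRegions.get? na1).getD (0, 0)).1 ((alignedRegions.get? na1).getD (0, 0)).2 1 ∨
              nl.1 ∈ PySem.List.pyRange ((alignedRegions.get? na2).getD (0, 0)).1 ((alignedRegions.get? na2).getD (0, 0)).2 1 ∨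
              nl.1 ∈ PySem.List.pyRange ((alignedRegions.get? na3).getD (0, 0)).1 ((alignedRegions.get? na3).getD (0, 0)).2 1 then
            nl.2 else 'N'
        else '-']) := by
    funext acc nl; split_ifs <;> rfl
  rw [hbody, PySem.List.foldl_append_singleton_eq_map]
  apply List.ext_getElem?
  intro k
  rw [List.nil_append, List.getElem?_map, PySem.List.getElem?_enumerate]
  have ha0 : 0 ≤ ((alignedRegions.get? na1).getD (0, 0)).1 := region_lo_nonneg na1
  have hb0 : 0 ≤ ((alignedRegions.get? na2).getD (0, 0)).1 := region_lo_nonneg na2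
  have hc0 : 0 ≤ ((alignedRegions.get? na3).getD (0, 0)).1 := region_lo_nonneg na3
  have hl1 : (ps.toList.map (fun ch => if PySem.Chars.isalpha ch then 'N' else '-')).length
      = ps.toList.length := by simp
  have hl2 := patchRegion_length ps.toList ((alignedRegions.get? na1).getD (0, 0)).1
    ((alignedRegions.get? na1).getD (0, 0)).2
    (ps.toList.map (fun ch => if PySem.Chars.isalpha ch then 'N' else '-'))
  have hl3 := patchRegion_length ps.toList ((alignedRegions.get? na2).getD (0, 0)).1
    ((alignedRegions.get? na2).getD (0, 0)).2
    (patchRegion ps.toList ((alignedRegions.get? na1).getD (0, 0)).1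
      ((alignedRegions.get? na1).getD (0, 0)).2
      (ps.toList.map (fun ch => if PySem.Chars.isalpha ch then 'N' else '-')))
  rw [patchRegion_getElem ps.toList _ _ hc0 _ (by rw [hl3, hl2, hl1]) k,
    patchRegion_getElem ps.toList _ _ hb0 _ (by rw [hl2, hl1]) k,
    patchRegion_getElem ps.toList _ _ ha0 _ (by rw [hl1]) k,
    List.getElem?_map]
  by_cases hk : k < ps.toList.length
  · have hsome : ps.toList[k]? = some ps.toList[k] := List.getElem?_eq_getElem hk
    have hgd : ps.toList.getD k ' ' = ps.toList[k] := by
      rw [List.getD_eq_getElem?_getD, hsome]; rfl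
    rw [hsome, hgd]
    simp only [Option.map_some, PySem.List.mem_pyRange_one, zero_add]
    by_cases hal : PySem.Chars.isalpha ps.toList[k] = true
    · simp only [hal, and_true]
      split_ifs <;> first | rfl | omega
    · have hal' : PySem.Chars.isalpha ps.toList[k] = false := by
        cases h : PySem.Chars.isalpha ps.toList[k] <;> simp_all
      simp only [hal', Bool.false_eq_true, and_false, if_false]
  · have hnone : ps.toList[k]? = none := List.getElem?_eq_none (by omega)
    rw [hnone]
    rw [if_neg (by rintro ⟨-, h, -⟩; omega),
      if_neg (by rintro ⟨-, h, -⟩; omega),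
      if_neg (by rintro ⟨-, h, -⟩; omega)]
    rfl
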